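-- pv_equiv track=rewrite | github.com/brunnoalexcson/computer-science-puc-go | Fundamentals of Computing 4/C02 - André Luiz/Assignments/Activity 8 - List of Exercises for Chapter 2 - Error Analysis/q19.py | binario_para_hexadecimal
-- ===== SOURCE A (Python) =====
-- def binario_para_hexadecimal(b):
--     while len(b) % 4 != 0:
--         b = "0" + b
--
--     hex_chars = "0123456789ABCDEF"
--     hexa = ""
--
--     for i in range(0, len(b), 4):
--         grupo = b[i:i+4]
--         decimal = (int(grupo[0])*8 +
--                    int(grupo[1])*4 +
--                    int(grupo[2])*2 +
--                    int(grupo[3]))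
--         hexa += hex_chars[decimal]
--
--     return hexa
-- ===== SOURCE B (Python) =====
-- def binario_para_hexadecimal(b):
--     hex_chars = "0123456789ABCDEF"
--     out = []
--     i = len(b)
--     while i > 0:
--         j = max(0, i - 4)
--         value = 0
--         weight = 1
--         for k in range(i - 1, j - 1, -1):
--             value += int(b[k]) * weight
--             weight *= 2
--         out.append(hex_chars[value])
--         i = j
--     return "".join(reversed(out))
-- ===== Notes on version B (the rewrite author's own statement) =====
-- stated objective: alternative
-- what changed: B drops A's while-loop that left-pads the input with zero characters to a multiple of four and A's left-to-right fixed-weight 8/4/2/1 slicing; instead B scans the string right-to-left in steps of four, valuing each (possibly shorter leftmost) chunk with running weights 1,2,4,8, and reverses the collected hex characters at the end.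
import Mathlib
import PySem

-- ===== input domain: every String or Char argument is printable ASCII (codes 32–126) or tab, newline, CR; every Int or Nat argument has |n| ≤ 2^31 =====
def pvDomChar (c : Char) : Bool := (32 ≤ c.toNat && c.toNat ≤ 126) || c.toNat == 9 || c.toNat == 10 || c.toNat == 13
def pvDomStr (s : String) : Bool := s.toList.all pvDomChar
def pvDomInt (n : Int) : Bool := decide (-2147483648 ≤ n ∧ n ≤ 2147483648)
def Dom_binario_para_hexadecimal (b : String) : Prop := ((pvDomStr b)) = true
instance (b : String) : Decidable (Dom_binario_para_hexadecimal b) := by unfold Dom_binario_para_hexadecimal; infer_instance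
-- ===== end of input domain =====

-- B replaces A's pad-then-left-to-right scan by a right-to-left scan in steps of 4 with
-- running weights 1,2,4,8 and no padding (objective: alternative decomposition, same cost).

-- shared helpers: int(single-char string) and hex_chars[d]; the .getD defaults are the
-- spots where the Python raises (ValueError / IndexError) — unreachable inside Pre_
def hexCharsL : List Char := ['0','1','2','3','4','5','6','7','8','9','A','B','C','D','E','F']
def pyDigit (c : Char) : Int := (PySem.Int.ofChars? [c]).getD 0
def hexAt (d : Int) : Char := (PySem.List.pyGet? hexCharsL d).getD '*'

-- ===== PORT A =====
-- while len(b) % 4 != 0: b = "0" + b   (fuel 4 only makes the loop total: at most 3 rounds run)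
def padA : Nat → List Char → List Char
  | 0, l => l
  | fuel + 1, l => if l.length % 4 ≠ 0 then padA fuel ('0' :: l) else l

-- decimal = int(grupo[0])*8 + int(grupo[1])*4 + int(grupo[2])*2 + int(grupo[3])
def nibbleA (g : List Char) : Int :=
  pyDigit ((PySem.List.pyGet? g 0).getD ' ') * 8 +
  pyDigit ((PySem.List.pyGet? g 1).getD ' ') * 4 +
  pyDigit ((PySem.List.pyGet? g 2).getD ' ') * 2 +
  pyDigit ((PySem.List.pyGet? g 3).getD ' ')

def binario_para_hexadecimal (b : String) : String :=
  let l := padA 4 b.toList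
  String.ofList ((PySem.List.pyRange 0 l.length 4).foldl
    (fun hexa i => hexa ++ [hexAt (nibbleA (PySem.List.slice l (some i) (some (i + 4))))])
    [])

-- ===== PORT B =====
-- value/weight accumulation over b[k] for k from i-1 down to j (right-to-left)
def nibbleB (chunk : List Char) : Int :=
  (chunk.foldr (fun c vw => (vw.1 + pyDigit c * vw.2, vw.2 * 2)) ((0 : Int), (1 : Int))).1

-- while i > 0: j = max(0, i-4); out.append(hex_chars[value of b[j:i]]); i = j
-- (fuel = i at the call only makes the loop total: i strictly decreases each round)
def altLoop (l : List Char) : Nat → Nat → List Char → List Char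
  | _, 0, out => out.reverse
  | 0, _, out => out.reverse
  | fuel + 1, i, out =>
    let j := i - 4
    altLoop l fuel j (out ++ [hexAt (nibbleB ((l.drop j).take (i - j)))])

def binario_para_hexadecimal_alt (b : String) : String :=
  String.ofList (altLoop b.toList b.toList.length b.toList.length [])

-- ===== PRECONDITION & SPEC =====
-- helpers for Pre_ (independent of the ports): left 0-padding to a multiple of 4,
-- the 4-character chunks, and the binary value of a chunk
def pad0 (l : List Char) : List Char :=
  List.replicate ((4 - l.length % 4) % 4) '0' ++ l

def chunks4 : List Char → List (List Char)
  | [] => []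
  | a :: b :: c :: d :: rest => [a, b, c, d] :: chunks4 rest
  | l => [l]

def nibbleVal (g : List Char) : Nat :=
  (g.foldr (fun c vw => (vw.1 + (c.toNat - 48) * vw.2, vw.2 * 2)) ((0 : Nat), (1 : Nat))).1

-- exactly the inputs on which the Python A returns: every character is a decimal digit
-- (else int() raises ValueError) and every right-aligned 4-digit group has value < 16
-- (else hex_chars[decimal] raises IndexError)
def Pre_binario_para_hexadecimal (b : String) : Prop :=
  (b.toList.all Char.isDigit) = true ∧
  ((chunks4 (pad0 b.toList)).all (fun g => nibbleVal g < 16)) = true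

instance (b : String) : Decidable (Pre_binario_para_hexadecimal b) := by
  unfold Pre_binario_para_hexadecimal; infer_instance

def pvWitness_binario_para_hexadecimal : String := "10111100"

def Spec_binario_para_hexadecimal (b : String) (out : String) : Prop :=
  out = binario_para_hexadecimal_alt b
instance (b : String) (out : String) : Decidable (Spec_binario_para_hexadecimal b out) := by
  unfold Spec_binario_para_hexadecimal; infer_instance

-- ===== CLAIM (what is proved, stated in full; the proofs are below) =====
def Claim_equal_binario_para_hexadecimal : Prop :=
  ∀ (b : String), Dom_binario_para_hexadecimal b → Pre_binario_para_hexadecimal b →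
    Spec_binario_para_hexadecimal b (binario_para_hexadecimal b)

-- ===== LEMMAS AND PROOFS =====

-- reference value: the hex characters of a list of 4*n binary digits, chunked from the left
def refN : Nat → List Char → List Char
  | 0, _ => []
  | n + 1, l => hexAt (nibbleA (l.take 4)) :: refN n (l.drop 4)

theorem padA_eq (fuel : Nat) (l : List Char) (hf : (4 - l.length % 4) % 4 ≤ fuel) :
    padA fuel l = pad0 l := by
  induction fuel generalizing l with
  | zero =>
      have h0 : (4 - l.length % 4) % 4 = 0 := by omega
      simp only [padA, pad0, h0, List.replicate_zero, List.nil_append]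
  | succ fuel ih =>
      rw [padA]
      split
      case isFalse h =>
        have h0 : (4 - l.length % 4) % 4 = 0 := by omega
        simp [pad0, h0]
      case isTrue h =>
      rw [ih ('0' :: l) (by simp only [List.length_cons]; omega)]
      simp only [pad0, List.length_cons]
      have h4 : (4 - (l.length + 1) % 4) % 4 + 1 = (4 - l.length % 4) % 4 := by omega
      calc List.replicate ((4 - (l.length + 1) % 4) % 4) '0' ++ '0' :: l
          = (List.replicate ((4 - (l.length + 1) % 4) % 4) '0' ++ ['0']) ++ l := by simp
        _ = List.replicate ((4 - (l.length + 1) % 4) % 4 + 1) '0' ++ l := by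
              rw [← List.replicate_succ']
        _ = List.replicate ((4 - l.length % 4) % 4) '0' ++ l := by rw [h4]

theorem length_pad0 (l : List Char) : (pad0 l).length = 4 * ((l.length + 3) / 4) := by
  simp [pad0]; omega

theorem ofChars_zero : (PySem.Int.ofChars? ['0']).getD 0 = (0 : Int) := by decide

theorem nib_pad (g : List Char) (h : g.length ≤ 4) :
    nibbleA (List.replicate (4 - g.length) '0' ++ g) = nibbleB g := by
  match g, h with
  | [], _ => decide
  | [a], _ =>
      simp [nibbleA, nibbleB, PySem.List.pyGet?, PySem.List.pyIdx?, pyDigit, ofChars_zero]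
  | [a, b], _ =>
      simp [nibbleA, nibbleB, PySem.List.pyGet?, PySem.List.pyIdx?, pyDigit, ofChars_zero]
      ring
  | [a, b, c], _ =>
      simp [nibbleA, nibbleB, PySem.List.pyGet?, PySem.List.pyIdx?, pyDigit, ofChars_zero]
      ring
  | [a, b, c, d], _ =>
      simp [nibbleA, nibbleB, PySem.List.pyGet?, PySem.List.pyIdx?, pyDigit]
      ring

theorem refN_snoc (m : Nat) (l : List Char) (h : l.length = 4 * (m + 1)) :
    refN (m + 1) l = refN m (l.take (4 * m)) ++ [hexAt (nibbleA (l.drop (4 * m)))] := by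
  induction m generalizing l with
  | zero =>
      simp [refN]
      rw [List.take_of_length_le (by omega)]
  | succ m ih =>
      rw [refN, ih (l.drop 4) (by simp [h]; omega), refN]
      have h1 : (l.take (4 * (m + 1))).take 4 = l.take 4 := by
        rw [List.take_take, show min 4 (4 * (m + 1)) = 4 from by omega]
      have h2 : (l.take (4 * (m + 1))).drop 4 = (l.drop 4).take (4 * m) := by
        rw [List.drop_take, show 4 * (m + 1) - 4 = 4 * m from by omega]
      have h3 : (l.drop 4).drop (4 * m) = l.drop (4 * (m + 1)) := by
        rw [List.drop_drop]
        congr 1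
        omega
      rw [h1, h2, h3]
      simp

theorem A_fold (n : Nat) (l : List Char) (acc : List Char) (h : l.length = 4 * n) :
    (List.range n).foldl
      (fun hexa k => hexa ++ [hexAt (nibbleA ((l.drop (4 * k)).take 4))]) acc
    = acc ++ refN n l := by
  induction n generalizing l acc with
  | zero => simp [refN]
  | succ n ih =>
      rw [List.range_succ, List.foldl_append]
      rw [PySem.List.foldl_congr_mem (List.range n) _
            (fun hexa k => hexa ++ [hexAt (nibbleA (((l.take (4 * n)).drop (4 * k)).take 4))]) acc
            (by
              intro hexa k hk
              have hk' : k < n := List.mem_range.mp hk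
              have he : ((l.take (4 * n)).drop (4 * k)).take 4 = (l.drop (4 * k)).take 4 := by
                rw [List.drop_take, List.take_take]
                congr 1 <;> omega
              simp [he])]
      rw [ih (l.take (4 * n)) acc (by simp; omega)]
      simp only [List.foldl_cons, List.foldl_nil]
      rw [List.take_of_length_le (l := l.drop (4 * n)) (by simp; omega)]
      rw [refN_snoc n l h]
      simp

theorem A_eq_ref (b : String) :
    binario_para_hexadecimal b
      = String.ofList (refN ((b.toList.length + 3) / 4) (pad0 b.toList)) := by
  simp only [binario_para_hexadecimal]
  rw [padA_eq 4 b.toList (by omega)]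
  set N := (b.toList.length + 3) / 4 with hN
  have hL : (pad0 b.toList).length = 4 * N := length_pad0 b.toList
  rw [PySem.List.pyRange_of_pos _ _ (by norm_num)]
  rw [List.foldl_map]
  have hcnt : (if (0 : Int) < ((pad0 b.toList).length : Int)
      then ((((pad0 b.toList).length : Int) - 0 + 4 - 1) / 4).toNat else 0) = N := by
    rw [hL]
    split <;> push_cast <;> omega
  rw [hcnt]
  congr 1
  rw [PySem.List.foldl_congr_mem (List.range N) _
        (fun hexa k => hexa ++ [hexAt (nibbleA (((pad0 b.toList).drop (4 * k)).take 4))]) []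
        (by
          intro hexa k hk
          have hs : PySem.List.slice (pad0 b.toList)
              (some (4 * (k : Int))) (some (4 * (k : Int) + 4))
              = ((pad0 b.toList).drop (4 * k)).take 4 := by
            rw [PySem.List.slice_toNat _ (by positivity) (by positivity)]
            have hc1 : (4 * (k : Int)).toNat = 4 * k := by omega
            have hc2 : (4 * (k : Int) + 4).toNat = 4 * k + 4 := by omega
            rw [hc1, hc2, show 4 * k + 4 - 4 * k = 4 from by omega]
          simp [hs])]
  rw [A_fold N (pad0 b.toList) [] hL]
  simp

theorem B_loop (l : List Char) (fuel i : Nat) (out : List Char) (hf : i ≤ fuel)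
    (h : i ≤ l.length) :
    altLoop l fuel i out = refN ((i + 3) / 4) (pad0 (l.take i)) ++ out.reverse := by
  induction fuel generalizing i out with
  | zero =>
      have h0 : i = 0 := by omega
      subst h0
      simp [altLoop, refN]
  | succ fuel ih =>
    by_cases h0 : i = 0
    · subst h0
      simp [altLoop, refN]
    · rw [show altLoop l (fuel + 1) i out
          = altLoop l fuel (i - 4) (out ++ [hexAt (nibbleB ((l.drop (i - 4)).take (i - (i - 4))))])
          from by cases i with | zero => omega | succ i => rfl]
      rw [ih (i - 4) _ (by omega) (by omega)]
      rw [List.reverse_append, List.reverse_singleton, List.singleton_append,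
          List.append_cons _ _ out.reverse]
      congr 1
      have hlen : (l.take i).length = i := by simp; omega
      by_cases h4 : 4 ≤ i
      · -- full chunk at the back
        have hij : i = (i - 4) + 4 := by omega
        have hsplit : l.take i = l.take (i - 4) ++ (l.drop (i - 4)).take (i - (i - 4)) := by
          rw [show i - (i - 4) = 4 from by omega]
          conv_lhs => rw [hij]
          exact List.take_add
        have hchunklen : ((l.drop (i - 4)).take (i - (i - 4))).length = 4 := by
          simp; omega
        have hpadsplit : pad0 (l.take i)
            = pad0 (l.take (i - 4)) ++ (l.drop (i - 4)).take (i - (i - 4)) := by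
          simp only [pad0, hlen]
          rw [hsplit]
          have : (l.take (i - 4)).length = i - 4 := by simp; omega
          rw [this, show (4 - i % 4) % 4 = (4 - (i - 4) % 4) % 4 from by omega]
          simp
        have htl : (l.take (i - 4)).length = i - 4 := by simp; omega
        have hm : (pad0 (l.take (i - 4))).length = 4 * ((i - 4 + 3) / 4) := by
          rw [length_pad0, htl]
        have hq : (i + 3) / 4 = (i - 4 + 3) / 4 + 1 := by omega
        rw [hq, refN_snoc ((i - 4 + 3) / 4) (pad0 (l.take i))
              (by rw [length_pad0, hlen]; omega)]
        rw [hpadsplit]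
        rw [List.take_left' hm, List.drop_left' hm]
        have := nib_pad ((l.drop (i - 4)).take (i - (i - 4))) (by omega)
        rw [hchunklen] at this
        simp only [Nat.sub_self, List.replicate_zero, List.nil_append] at this
        rw [this]
      · -- short leftmost chunk: i ∈ {1,2,3}, j = 0
        have hi3 : 1 ≤ i ∧ i ≤ 3 := by omega
        rw [show i - 4 = 0 from by omega]
        simp only [List.drop_zero, Nat.sub_zero]
        rw [show (0 + 3) / 4 = 0 from by norm_num, show (i + 3) / 4 = 1 from by omega]
        have hpad : pad0 (l.take i) = List.replicate (4 - (l.take i).length) '0' ++ l.take i := by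
          simp only [pad0, hlen]
          congr 2
          omega
        have hlen4 : (pad0 (l.take i)).length = 4 := by rw [length_pad0, hlen]; omega
        have key : refN 1 (pad0 (l.take i)) = [hexAt (nibbleA (pad0 (l.take i)))] := by
          simp only [refN]
          rw [List.take_of_length_le hlen4.le]
        rw [key, hpad, nib_pad (l.take i) (by rw [hlen]; omega)]
        simp [refN]

-- ===== VERDICT (by name: the statement is the Claim_ definition above) =====
theorem binario_para_hexadecimal_spec : Claim_equal_binario_para_hexadecimal := by
  intro b _ _
  unfold Spec_binario_para_hexadecimal
  rw [A_eq_ref, binario_para_hexadecimal_alt,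
      B_loop b.toList b.toList.length b.toList.length [] le_rfl le_rfl, List.take_length]
  simp
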